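-- pv_equiv track=rewrite | github.com/RomanVoran/telebot_VK | testingStringWork.py | validationMessage
-- ===== SOURCE A (Python) =====
-- def validationMessage(a):
--     # функция проверки правильности ввода сообщения о новом id проверяемой группы
--     # на вход функция принимает строку соощения
--     # возвращает строку "N" в случае если в сообщении содержатся ошибки
--     # возвращает строку с "чистым" id группы
--     start = -1 # индекс начала циферного id (следующий после "[")
--     end = -1   # индекс конца циферного id (предидущий после "]")
--
--     for i in range(len(a)):
--         if a[i]==']':
--             end = i
--             break
--         elif a[i]=='[':
--             start = i+1
--
--     markOfErr = 0# маркер ошибки ввода (если в числе id будт найден нециферный символ)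
--     a = a[start:end]
--     for c in a:
--         if not((ord(c)>=48)&(ord(c)<=57)):
--             markOfErr = 1;
--             break
--
--     if (start>0) & (end>start) & (markOfErr!=1): # проверка на верную расстановку кавычек и то, что в ковычках только цифры
--         return a
--     else:
--         return 'N'
-- ===== SOURCE B (Python) =====
-- def validationMessage(a):
--     # single-pass state machine: never computes indices or slices.
--     # inside = have we seen a '['; buf = chars since the most recent '[';
--     # ok = whether buf is all ASCII digits so far. The first ']' decides.
--     inside = False
--     buf = []
--     ok = True
--     for c in a:
--         if c == ']':
--             if inside and buf and ok:
--                 return ''.join(buf)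
--             return 'N'
--         if c == '[':
--             inside, buf, ok = True, [], True
--         elif inside:
--             buf.append(c)
--             ok = ok and ('0' <= c <= '9')
--     return 'N'
-- ===== Notes on version B (the rewrite author's own statement) =====
-- stated objective: alternative
-- what changed: Replaces A's staged design (an index-tracking scan for the bracket positions, then a slice, then a second loop setting an error flag) with a single fused-pass state machine that accumulates the candidate id and its digit-validity while reading and decides at the first closing bracket, with no index arithmetic or slicing.
import Mathlib
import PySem

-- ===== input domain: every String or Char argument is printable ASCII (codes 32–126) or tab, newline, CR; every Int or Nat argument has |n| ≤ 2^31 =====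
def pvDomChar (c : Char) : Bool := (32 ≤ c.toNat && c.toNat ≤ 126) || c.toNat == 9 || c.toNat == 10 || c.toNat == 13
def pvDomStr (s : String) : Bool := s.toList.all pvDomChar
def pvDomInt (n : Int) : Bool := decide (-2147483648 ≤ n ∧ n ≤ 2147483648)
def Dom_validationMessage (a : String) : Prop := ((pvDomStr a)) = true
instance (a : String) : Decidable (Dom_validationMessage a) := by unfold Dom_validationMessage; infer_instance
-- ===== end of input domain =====

-- B replaces A's staged index-scan + slice + error-flag loop with a single-pass
-- state machine that accumulates the candidate id while reading (objective: alternative).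

-- ===== PORT A =====
-- A's first loop: scan for the first ']' (break, end := i), tracking start := i+1 at each '['.
def vmScan (cs : List Char) (i : Nat) (start : Int) : Int × Int :=
  match cs with
  | [] => (start, -1)
  | c :: rest =>
    if c = ']' then (start, (i : Int))
    else vmScan rest (i + 1) (if c = '[' then ((i : Int) + 1) else start)

-- A's second loop: markOfErr = 1 iff some character is not an ASCII digit (break on first).
def vmErr (cs : List Char) : Bool :=
  match cs with
  | [] => false
  | c :: rest => if ¬ (48 ≤ c.toNat ∧ c.toNat ≤ 57) then true else vmErr rest

def validationMessage (a : String) : String :=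
  let se := vmScan a.toList 0 (-1)
  let start := se.1
  let ed := se.2
  let a' := PySem.Str.slice a (some start) (some ed)
  let markOfErr := vmErr a'.toList
  if start > 0 ∧ ed > start ∧ markOfErr ≠ true then a' else "N"

-- ===== PORT B =====
-- Source B's single loop: state (inside, buf, ok); the first ']' decides the answer;
-- '[' resets the state; other characters are buffered (when inside) with a digit check.
def vmLoop (cs : List Char) (inside : Bool) (buf : List Char) (ok : Bool) : String :=
  match cs with
  | [] => "N"
  | c :: rest =>
    if c = ']' then
      if inside ∧ buf ≠ [] ∧ ok then String.ofList buf else "N"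
    else if c = '[' then vmLoop rest true [] true
    else if inside then vmLoop rest inside (buf ++ [c]) (ok && decide ('0' ≤ c ∧ c ≤ '9'))
    else vmLoop rest inside buf ok

def validationMessage_alt (a : String) : String := vmLoop a.toList false [] true

-- ===== PRECONDITION & SPEC =====
def Spec_validationMessage (a : String) (out : String) : Prop := out = validationMessage_alt a
instance (a : String) (out : String) : Decidable (Spec_validationMessage a out) := by unfold Spec_validationMessage; infer_instance

-- ===== CLAIM (what is proved, stated in full; the proofs are below) =====
def Claim_equal_validationMessage : Prop := ∀ (a : String), Dom_validationMessage a → Spec_validationMessage a (validationMessage a)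

-- ===== LEMMAS AND PROOFS =====

-- proof helper: split a list at the FIRST occurrence of sep (none if absent)
def vmPart (sep : Char) : List Char → Option (List Char × List Char)
  | [] => none
  | c :: t => if c = sep then some ([], t) else (vmPart sep t).map (fun p => (c :: p.1, p.2))

-- A's "start" accumulator in isolation: the index-after of the last '[' seen, else the seed.
def vmLast (cs : List Char) (i : Nat) (s : Int) : Int :=
  match cs with
  | [] => s
  | c :: rest => vmLast rest (i + 1) (if c = '[' then ((i : Int) + 1) else s)

theorem vmPart_eq_none {sep : Char} {cs : List Char} (h : vmPart sep cs = none) : sep ∉ cs := by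
  induction cs with
  | nil => simp
  | cons c t ih =>
    by_cases hc : c = sep
    · simp [vmPart, hc] at h
    · cases hm : vmPart sep t with
      | none =>
        intro hmem
        rcases List.mem_cons.mp hmem with he | ht
        · exact hc he.symm
        · exact ih hm ht
      | some p => simp [vmPart, hc, hm] at h

theorem vmPart_eq_some {sep : Char} {cs pre post : List Char}
    (h : vmPart sep cs = some (pre, post)) : cs = pre ++ sep :: post ∧ sep ∉ pre := by
  induction cs generalizing pre post with
  | nil => simp [vmPart] at h
  | cons c t ih =>
    by_cases hc : c = sep
    · simp [vmPart, hc] at h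
      obtain ⟨h1, h2⟩ := h
      subst h1; subst h2; simp [hc]
    · cases hm : vmPart sep t with
      | none => simp [vmPart, hc, hm] at h
      | some p =>
        obtain ⟨p1, p2⟩ := p
        simp [vmPart, hc, hm] at h
        obtain ⟨h1, h2⟩ := h
        obtain ⟨e1, e2⟩ := ih hm
        subst h1; subst h2
        refine ⟨by simp [e1], ?_⟩
        intro hmem
        rcases List.mem_cons.mp hmem with he | ht
        · exact hc he.symm
        · exact e2 ht

theorem vmScan_not_mem {cs : List Char} (h : ']' ∉ cs) (i : Nat) (s : Int) :
    vmScan cs i s = (vmLast cs i s, -1) := by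
  induction cs generalizing i s with
  | nil => simp [vmScan, vmLast]
  | cons c t ih =>
    simp at h
    have hc : ¬ c = ']' := fun e => h.1 e.symm
    simp [vmScan, vmLast, hc, ih h.2]

theorem vmScan_append {pre : List Char} (h : ']' ∉ pre) (post : List Char) (i : Nat) (s : Int) :
    vmScan (pre ++ ']' :: post) i s = (vmLast pre i s, ((i + pre.length : Nat) : Int)) := by
  induction pre generalizing i s with
  | nil => simp [vmScan, vmLast]
  | cons c t ih =>
    simp at h
    have hc : ¬ c = ']' := fun e => h.1 e.symm
    simp [vmScan, vmLast, hc, ih h.2, Prod.ext_iff]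
    ring

theorem vmLast_not_mem {cs : List Char} (h : '[' ∉ cs) (i : Nat) (s : Int) :
    vmLast cs i s = s := by
  induction cs generalizing i s with
  | nil => rfl
  | cons c t ih =>
    simp at h
    have hc : ¬ c = '[' := fun e => h.1 e.symm
    simp [vmLast, hc, ih h.2]

theorem vmLast_append (xs ys : List Char) (i : Nat) (s : Int) :
    vmLast (xs ++ ys) i s = vmLast ys (i + xs.length) (vmLast xs i s) := by
  induction xs generalizing i s with
  | nil => simp [vmLast]
  | cons c t ih =>
    simp only [List.cons_append, vmLast, ih, List.length_cons]
    congr 1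
    omega

theorem vmLast_cases (cs : List Char) (i : Nat) (s : Int) :
    vmLast cs i s = s ∨ 0 < vmLast cs i s := by
  induction cs generalizing i s with
  | nil => left; rfl
  | cons c t ih =>
    by_cases hc : c = '['
    · simp [vmLast, hc]
      rcases ih (i + 1) ((i : Int) + 1) with h | h
      · right; rw [h]; positivity
      · right; exact h
    · simp [vmLast, hc]; exact ih _ _

theorem vmErr_eq (cs : List Char) :
    vmErr cs = ! cs.all (fun c => decide ('0' ≤ c ∧ c ≤ '9')) := by
  induction cs with
  | nil => rfl
  | cons c t ih =>
    have hord : ('0' ≤ c ∧ c ≤ '9') ↔ (48 ≤ c.toNat ∧ c.toNat ≤ 57) :=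
      ⟨fun ⟨h1, h2⟩ => ⟨h1, h2⟩, fun ⟨h1, h2⟩ => ⟨h1, h2⟩⟩
    by_cases hd : 48 ≤ c.toNat ∧ c.toNat ≤ 57
    · have hdec : decide ('0' ≤ c ∧ c ≤ '9') = true := by
        simpa using hord.mpr hd
      simp only [vmErr, if_neg (not_not_intro hd), List.all_cons, hdec, Bool.true_and, ih]
    · have hdec : decide ('0' ≤ c ∧ c ≤ '9') = false := by
        simp only [decide_eq_false_iff_not]
        exact fun hc => hd (hord.mp hc)
      simp only [vmErr, if_pos hd, List.all_cons, hdec, Bool.false_and, Bool.not_false]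

-- B-side: without a ']' the loop falls through to 'N'
theorem vmLoop_no_close {cs : List Char} (h : ']' ∉ cs) (inside : Bool) (buf : List Char) (ok : Bool) :
    vmLoop cs inside buf ok = "N" := by
  induction cs generalizing inside buf ok with
  | nil => rfl
  | cons c t ih =>
    simp at h
    have hc : ¬ c = ']' := fun e => h.1 e.symm
    by_cases hb : c = '[' <;> simp [vmLoop, hc, hb] <;>
      first
        | exact ih h.2 _ _ _
        | (cases inside <;> simp <;> exact ih h.2 _ _ _)

-- B-side: bracket-free, close-free prefix is skipped when not inside
theorem vmLoop_skip {hd : List Char} (h1 : ']' ∉ hd) (h2 : '[' ∉ hd) (rest : List Char) :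
    vmLoop (hd ++ rest) false [] true = vmLoop rest false [] true := by
  induction hd with
  | nil => rfl
  | cons c t ih =>
    simp at h1 h2
    have hc : ¬ c = ']' := fun e => h1.1 e.symm
    have hb : ¬ c = '[' := fun e => h2.1 e.symm
    simpa [vmLoop, hc, hb] using ih h1.2 h2.2

-- B-side: a '[' resets the state
theorem vmLoop_open {hd : List Char} (h : ']' ∉ hd) (rest : List Char)
    (inside : Bool) (buf : List Char) (ok : Bool) :
    vmLoop (hd ++ '[' :: rest) inside buf ok = vmLoop rest true [] true := by
  induction hd generalizing inside buf ok with
  | nil => simp [vmLoop]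
  | cons c t ih =>
    simp at h
    have hc : ¬ c = ']' := fun e => h.1 e.symm
    by_cases hb : c = '[' <;> simp [vmLoop, hc, hb] <;>
      first
        | exact ih h.2 _ _ _
        | (cases inside <;> simp <;> exact ih h.2 _ _ _)

-- B-side: inside, over a bracket-free run ending at ']'
theorem vmLoop_digits {sub : List Char} (h1 : ']' ∉ sub) (h2 : '[' ∉ sub)
    (post : List Char) (buf : List Char) (ok : Bool) :
    vmLoop (sub ++ ']' :: post) true buf ok =
      if (buf ++ sub) ≠ [] ∧ (ok && sub.all (fun c => decide ('0' ≤ c ∧ c ≤ '9'))) = true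
      then String.ofList (buf ++ sub) else "N" := by
  induction sub generalizing buf ok with
  | nil =>
    simp only [List.nil_append, vmLoop, List.all_nil, Bool.and_true, List.append_nil, ne_eq]
    cases ok <;> by_cases hb : buf = [] <;> simp [hb]
  | cons c t ih =>
    simp at h1 h2
    have hc : ¬ c = ']' := fun e => h1.1 e.symm
    have hb : ¬ c = '[' := fun e => h2.1 e.symm
    simp only [List.cons_append, vmLoop, if_neg hc, if_neg hb]
    rw [ih h1.2 h2.2]
    simp [Bool.and_assoc]

-- ===== VERDICT (by name: the statement is the Claim_ definition above) =====
theorem validationMessage_spec : Claim_equal_validationMessage := by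
  intro a _
  unfold Spec_validationMessage validationMessage validationMessage_alt
  cases h1 : vmPart ']' a.toList with
  | none =>
    -- no ']' : A's end stays -1 so the guard fails; B's loop falls through
    have hnm := vmPart_eq_none h1
    rw [vmScan_not_mem hnm, vmLoop_no_close hnm]
    rcases vmLast_cases a.toList 0 (-1) with h | h <;>
      simp [h] <;> omega
  | some p =>
    obtain ⟨pre, post⟩ := p
    obtain ⟨hsplit, hpre⟩ := vmPart_eq_some h1
    rw [hsplit, vmScan_append hpre]
    cases h2 : vmPart '[' pre.reverse with
    | none =>
      -- no '[' before the ']' : A's start stays -1; B reaches ']' not inside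
      have hnb : '[' ∉ pre := by
        have := vmPart_eq_none h2
        simpa using this
      rw [vmLast_not_mem hnb, vmLoop_skip hpre hnb]
      simp [vmLoop]
    | some q =>
      obtain ⟨revSub, revHead⟩ := q
      obtain ⟨hsplit2, hnsub⟩ := vmPart_eq_some h2
      have hpre2 : pre = revHead.reverse ++ '[' :: revSub.reverse := by
        have : pre.reverse.reverse = (revSub ++ '[' :: revHead).reverse := by rw [hsplit2]
        simpa using this
      set hd := revHead.reverse with hhd
      set sub := revSub.reverse with hsub
      have hnsub' : '[' ∉ sub := by simpa [hsub] using hnsub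
      have hnclhd : ']' ∉ hd := fun hm => hpre (by rw [hpre2]; exact List.mem_append_left _ hm)
      have hnclsub : ']' ∉ sub := fun hm =>
        hpre (by rw [hpre2]; exact List.mem_append_right _ (List.mem_cons_of_mem _ hm))
      have hstart : vmLast pre 0 (-1) = ((hd.length + 1 : Nat) : Int) := by
        rw [hpre2, vmLast_append]
        simp [vmLast, vmLast_not_mem hnsub']
      rw [hstart]
      have hlen : (0 : Nat) + pre.length = (hd.length + 1) + sub.length := by
        simp [hpre2]; omega
      rw [hlen]
      have hslice : (PySem.Str.slice a (some ((hd.length + 1 : Nat) : Int))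
          (some ((hd.length + 1 + sub.length : Nat) : Int))).toList = sub := by
        have h0 : a.toList = (hd ++ ['[']) ++ (sub ++ ']' :: post) := by
          rw [hsplit, hpre2]; simp
        rw [PySem.Str.toList_slice, PySem.Chars.slice_eq_listSlice, h0,
            PySem.List.slice_natCast]
        have e1 : hd.length + 1 + sub.length - (hd.length + 1) = sub.length := by omega
        have e2 : hd.length + 1 = (hd ++ ['[']).length := by simp
        rw [e1, e2, List.drop_left, List.take_left]
      have hB : vmLoop (pre ++ ']' :: post) false [] true =
          if sub ≠ [] ∧ (true && sub.all (fun c => decide ('0' ≤ c ∧ c ≤ '9'))) = true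
          then String.ofList sub else "N" := by
        have e : pre ++ ']' :: post = hd ++ '[' :: (sub ++ ']' :: post) := by
          rw [hpre2]; simp
        rw [e, vmLoop_open hnclhd, vmLoop_digits hnclsub hnsub' post [] true]
        simp
      rw [hB]
      simp only [hslice, vmErr_eq]
      by_cases hne : sub = []
      · simp [hne]
      · by_cases hall : sub.all (fun c => decide ('0' ≤ c ∧ c ≤ '9')) = true
        · have hlt : ((hd.length + 1 : Nat) : Int) < ((hd.length + 1 + sub.length : Nat) : Int) := by
            have : 0 < sub.length := List.length_pos_iff.mpr hne
            exact_mod_cast by omega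
          have hpos : (0 : Int) < ((hd.length + 1 : Nat) : Int) := by positivity
          have hmk : PySem.Str.slice a (some ((hd.length + 1 : Nat) : Int))
              (some ((hd.length + 1 + sub.length : Nat) : Int)) = String.ofList sub := by
            apply String.toList_inj.mp
            simpa using hslice
          have hP : ∀ x ∈ sub, '0' ≤ x ∧ x ≤ '9' := fun x hx => by
            simpa using List.all_eq_true.mp hall x hx
          rw [if_pos ⟨hpos, hlt, by simpa using hP⟩, if_pos ⟨hne, by simpa using hall⟩]
          exact hmk
        · have hnP : ¬ (∀ x ∈ sub, '0' ≤ x ∧ x ≤ '9') := fun hP =>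
            hall (List.all_eq_true.mpr fun x hx => by simpa using hP x hx)
          simp [hnP]
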